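-- pv_equiv track=rewrite | github.com/jonathonreilly/toy-physics | scripts/frontier_gravitational_time_dilation.py | make_mass_cluster
-- ===== SOURCE A (Python) =====
-- def make_mass_cluster(
--     center_x: int, center_y: int, count: int
-- ) -> frozenset[tuple[int, int]]:
--     """Build a cluster of persistent nodes around a center point."""
--     offsets_by_distance = sorted(
--         [(dx, dy) for dx in range(-6, 7) for dy in range(-6, 7)],
--         key=lambda p: p[0] ** 2 + p[1] ** 2,
--     )
--     nodes = []
--     for dx, dy in offsets_by_distance:
--         if len(nodes) >= count:
--             break
--         nodes.append((center_x + dx, center_y + dy))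
--     return frozenset(nodes)
-- ===== SOURCE B (Python) =====
-- def make_mass_cluster(center_x, center_y, count):
--     """Build a cluster of persistent nodes around a center point.
--
--     Counting-sort selection: squared distances of offsets in [-6,6]^2 range
--     over 0..72, so walk the squared-distance buckets in increasing order and,
--     within each bucket, generation order (dx then dy) -- no sort needed.
--     """
--     nodes = []
--     for d2 in range(0, 73):
--         for dx in range(-6, 7):
--             for dy in range(-6, 7):
--                 if len(nodes) < count and dx * dx + dy * dy == d2:
--                     nodes.append((center_x + dx, center_y + dy))
--     return frozenset(nodes)
-- ===== Notes on version B (the rewrite author's own statement) =====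
-- stated objective: alternative
-- what changed: Replaces the full comparison sort of all 169 offsets (then truncate with a break loop) by a counting-sort walk: iterate squared distance d2 = 0..72 and append, within each bucket, offsets in generation order until count nodes are collected; stable-sort tie order is reproduced without any sort.
import Mathlib
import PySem

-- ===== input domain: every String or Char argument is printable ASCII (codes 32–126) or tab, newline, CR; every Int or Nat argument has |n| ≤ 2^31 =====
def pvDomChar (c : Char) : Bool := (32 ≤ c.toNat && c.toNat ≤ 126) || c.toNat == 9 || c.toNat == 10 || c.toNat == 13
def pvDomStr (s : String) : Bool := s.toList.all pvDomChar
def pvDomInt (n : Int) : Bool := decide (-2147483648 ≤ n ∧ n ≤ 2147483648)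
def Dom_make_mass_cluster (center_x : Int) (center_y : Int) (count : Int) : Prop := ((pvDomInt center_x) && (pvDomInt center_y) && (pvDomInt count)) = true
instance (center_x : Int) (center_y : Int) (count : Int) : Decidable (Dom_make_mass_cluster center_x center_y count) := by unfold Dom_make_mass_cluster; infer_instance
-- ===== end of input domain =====

-- B replaces A's full comparison sort of the 169 offsets (then truncate) by a counting-sort walk
-- over the squared-distance buckets 0..72 (alternative decomposition, no sort).

-- ===== PORT A =====
-- [(dx, dy) for dx in range(-6, 7) for dy in range(-6, 7)]
def pvOffsets : List (Int × Int) :=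
  (PySem.List.pyRange (-6) 7 1).flatMap (fun dx => (PySem.List.pyRange (-6) 7 1).map (fun dy => (dx, dy)))

-- the for-loop with break over offsets_by_distance
def pvLoopA (center_x center_y count : Int) : List (Int × Int) → List (Int × Int) → List (Int × Int)
  | [], nodes => nodes
  | (dx, dy) :: rest, nodes =>
      if count ≤ (nodes.length : Int) then nodes
      else pvLoopA center_x center_y count rest (nodes ++ [(center_x + dx, center_y + dy)])

def make_mass_cluster (center_x : Int) (center_y : Int) (count : Int) : List (Int × Int) :=
  PySem.Set.ofList
    (pvLoopA center_x center_y count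
      (PySem.List.sorted pvOffsets (fun p => p.1 ^ 2 + p.2 ^ 2) false) [])

-- ===== PORT B =====
def make_mass_cluster_alt (center_x : Int) (center_y : Int) (count : Int) : List (Int × Int) :=
  PySem.Set.ofList
    ((PySem.List.pyRange 0 73 1).foldl (fun nodes d2 =>
      (PySem.List.pyRange (-6) 7 1).foldl (fun nodes dx =>
        (PySem.List.pyRange (-6) 7 1).foldl (fun nodes dy =>
          if (nodes.length : Int) < count ∧ dx * dx + dy * dy = d2 then
            nodes ++ [(center_x + dx, center_y + dy)]
          else nodes) nodes) nodes) [])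

-- ===== PRECONDITION & SPEC =====
def Spec_make_mass_cluster (center_x : Int) (center_y : Int) (count : Int) (out : List (Int × Int)) : Prop := out = make_mass_cluster_alt center_x center_y count
instance (center_x : Int) (center_y : Int) (count : Int) (out : List (Int × Int)) : Decidable (Spec_make_mass_cluster center_x center_y count out) := by unfold Spec_make_mass_cluster; infer_instance

-- ===== CLAIM (what is proved, stated in full; the proofs are below) =====
def Claim_equal_make_mass_cluster : Prop := ∀ (center_x : Int) (center_y : Int) (count : Int), Dom_make_mass_cluster center_x center_y count → Spec_make_mass_cluster center_x center_y count (make_mass_cluster center_x center_y count)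

-- ===== LEMMAS AND PROOFS =====

-- A's loop appends f to the first (count - |nodes|) offsets
lemma pvLoopA_eq (cx cy count : Int) (L : List (Int × Int)) :
    ∀ nodes, pvLoopA cx cy count L nodes
      = nodes ++ (L.take (count - nodes.length).toNat).map (fun p => (cx + p.1, cy + p.2)) := by
  induction L with
  | nil => intro nodes; simp [pvLoopA]
  | cons hd tl ih =>
      intro nodes
      obtain ⟨dx, dy⟩ := hd
      by_cases h : count ≤ (nodes.length : Int)
      · have : (count - (nodes.length : Int)).toNat = 0 := by omega
        simp [pvLoopA, h, this]
      · have h1 : (count - (nodes.length : Int)).toNat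
            = (count - ((nodes.length : Int) + 1)).toNat + 1 := by omega
        simp only [pvLoopA, if_neg h, ih]
        simp [h1, List.take_succ_cons]
  -- generic conditional-append fold: result = map g over the cap-truncated filtered candidates
lemma pvCondFold {α : Type} (count : Int) (P : α → Prop) [DecidablePred P]
    (g : α → Int × Int) (xs : List α) :
    ∀ nodes, xs.foldl (fun nodes x =>
        if (nodes.length : Int) < count ∧ P x then nodes ++ [g x] else nodes) nodes
      = nodes ++ (((xs.filter (fun x => decide (P x))).take (count - nodes.length).toNat).map g) := by
  induction xs with
  | nil => intro nodes; simp
  | cons x xs ih =>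
      intro nodes
      by_cases hp : P x
      · by_cases hl : (nodes.length : Int) < count
        · have hc : ((nodes.length : Int) < count ∧ P x) := ⟨hl, hp⟩
          have h1 : (count - (nodes.length : Int)).toNat
              = (count - ((nodes.length : Int) + 1)).toNat + 1 := by omega
          rw [List.foldl_cons, if_pos hc, ih]
          simp [hp, h1, List.take_succ_cons]
        · have hc : ¬((nodes.length : Int) < count ∧ P x) := by tauto
          have h0 : (count - (nodes.length : Int)).toNat = 0 := by omega
          rw [List.foldl_cons, if_neg hc, ih]
          simp [hp, h0]
      · have hc : ¬((nodes.length : Int) < count ∧ P x) := by tauto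
        rw [List.foldl_cons, if_neg hc, ih]
        simp [hp]

-- B's candidate stream: (d2, dx, dy) triples in bucket order
def pvTriples : List (Int × Int × Int) :=
  (PySem.List.pyRange 0 73 1).flatMap (fun d2 => pvOffsets.map (fun p => (d2, p.1, p.2)))

lemma pvAltFold_eq (cx cy count : Int) :
    (PySem.List.pyRange 0 73 1).foldl (fun nodes d2 =>
      (PySem.List.pyRange (-6) 7 1).foldl (fun nodes dx =>
        (PySem.List.pyRange (-6) 7 1).foldl (fun nodes dy =>
          if (nodes.length : Int) < count ∧ dx * dx + dy * dy = d2 then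
            nodes ++ [(cx + dx, cy + dy)]
          else nodes) nodes) nodes) []
    = pvTriples.foldl (fun nodes t =>
        if (nodes.length : Int) < count ∧ t.2.1 * t.2.1 + t.2.2 * t.2.2 = t.1 then
          nodes ++ [(cx + t.2.1, cy + t.2.2)]
        else nodes) [] := by
  simp [pvTriples, pvOffsets, List.foldl_flatMap, List.foldl_map]

-- the bucket walk visits exactly the sorted offset order (closed fact, by kernel computation)
set_option maxRecDepth 40000 in
lemma pvFiltered_eq_sorted :
    (pvTriples.filter (fun t => decide (t.2.1 * t.2.1 + t.2.2 * t.2.2 = t.1))).map (fun t => (t.2.1, t.2.2))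
      = PySem.List.sorted pvOffsets (fun p => p.1 ^ 2 + p.2 ^ 2) false := by
  decide

-- ===== VERDICT (by name: the statement is the Claim_ definition above) =====
theorem make_mass_cluster_spec : Claim_equal_make_mass_cluster := by
  intro cx cy count _
  unfold Spec_make_mass_cluster make_mass_cluster make_mass_cluster_alt
  rw [pvAltFold_eq, pvLoopA_eq,
    pvCondFold count (fun t : Int × Int × Int => t.2.1 * t.2.1 + t.2.2 * t.2.2 = t.1)
      (fun t => (cx + t.2.1, cy + t.2.2)) pvTriples []]
  congr 1
  rw [← pvFiltered_eq_sorted]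
  simp [List.map_take, List.map_map, Function.comp_def]
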